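-- pv_equiv track=rewrite | github.com/guancyxx/cdut_stu_agents | ai-agent-lite/app/services/session_service.py | extract_problem_context
-- ===== SOURCE A (Python) =====
-- def extract_problem_context(messages: list[dict]) -> str:
--     """Extract the most recent problem context message from conversation history.
--
--     The frontend sends a structured message starting with
--     "SYSTEM CONTEXT: OJ problem has been selected." when the student
--     selects a problem. We find the latest one and return it so
--     all agents stay anchored to the current problem.
--
--     Returns empty string if no problem context message is found.
--     """
--     if not messages:
--         return ""
--     for msg in reversed(messages):
--         content = str(msg.get("content", ""))
--         if content.startswith("SYSTEM CONTEXT:"):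
--             return content
--     return ""
-- ===== SOURCE B (Python) =====
-- def extract_problem_context(messages: list[dict]) -> str:
--     """Single forward pass keeping the latest matching message."""
--     result = ""
--     for msg in messages:
--         content = str(msg.get("content", ""))
--         if content.startswith("SYSTEM CONTEXT:"):
--             result = content
--     return result
-- ===== Notes on version B (the rewrite author's own statement) =====
-- stated objective: simpler
-- what changed: Forward single pass with a last-match accumulator replaces the reversed scan with early return and the empty-list guard.
import Mathlib
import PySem

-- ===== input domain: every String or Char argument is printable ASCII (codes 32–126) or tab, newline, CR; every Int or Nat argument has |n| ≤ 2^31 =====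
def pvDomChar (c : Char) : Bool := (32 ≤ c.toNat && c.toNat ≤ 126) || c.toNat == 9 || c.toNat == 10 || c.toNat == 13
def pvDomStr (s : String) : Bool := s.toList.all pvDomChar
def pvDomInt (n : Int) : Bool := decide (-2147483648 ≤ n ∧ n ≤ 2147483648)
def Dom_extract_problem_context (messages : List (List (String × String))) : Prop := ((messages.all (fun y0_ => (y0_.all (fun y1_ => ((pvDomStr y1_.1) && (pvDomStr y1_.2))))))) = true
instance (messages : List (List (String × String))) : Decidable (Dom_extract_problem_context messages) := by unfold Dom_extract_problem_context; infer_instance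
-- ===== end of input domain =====

-- B replaces A's reversed scan with early return by a single forward pass keeping the latest match (simpler; same cost).


-- ===== PORT A =====
-- A's backward loop: first match of reversed(messages), early return
def pvRevScan : List (List (String × String)) → String
  | [] => ""
  | msg :: rest =>
    let content := (PySem.Dict.mk msg).getD "content" ""
    if PySem.Str.startswith content "SYSTEM CONTEXT:" then content else pvRevScan rest

def extract_problem_context (messages : List (List (String × String))) : String :=
  if messages = [] then "" else pvRevScan messages.reverse

-- ===== PORT B =====
def extract_problem_context_alt (messages : List (List (String × String))) : String :=
  messages.foldl (fun result msg =>
    let content := (PySem.Dict.mk msg).getD "content" ""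
    if PySem.Str.startswith content "SYSTEM CONTEXT:" then content else result) ""

-- ===== PRECONDITION & SPEC =====
def Spec_extract_problem_context (messages : List (List (String × String))) (out : String) : Prop := out = extract_problem_context_alt messages
instance (messages : List (List (String × String))) (out : String) : Decidable (Spec_extract_problem_context messages out) := by unfold Spec_extract_problem_context; infer_instance

-- ===== CLAIM (what is proved, stated in full; the proofs are below) =====
def Claim_equal_extract_problem_context : Prop := ∀ (messages : List (List (String × String))), Dom_extract_problem_context messages → Spec_extract_problem_context messages (extract_problem_context messages)

-- ===== LEMMAS AND PROOFS =====

-- ===== VERDICT (by name: the statement is the Claim_ definition above) =====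
-- proof-side helper: A's loop generalized with an accumulator for the no-match case
def pvRevScanAcc (acc : String) : List (List (String × String)) → String
  | [] => acc
  | msg :: rest =>
    let content := (PySem.Dict.mk msg).getD "content" ""
    if PySem.Str.startswith content "SYSTEM CONTEXT:" then content else pvRevScanAcc acc rest

theorem pvRevScan_eq_acc (l : List (List (String × String))) : pvRevScan l = pvRevScanAcc "" l := by
  induction l with
  | nil => rfl
  | cons m t ih => simp [pvRevScan, pvRevScanAcc, ih]

theorem pvRevScanAcc_append (acc : String) (xs : List (List (String × String))) (m : List (String × String)) :
    pvRevScanAcc acc (xs ++ [m]) =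
      pvRevScanAcc (if PySem.Str.startswith ((PySem.Dict.mk m).getD "content" "") "SYSTEM CONTEXT:"
                    then (PySem.Dict.mk m).getD "content" "" else acc) xs := by
  induction xs with
  | nil => simp [pvRevScanAcc]
  | cons h t ih => simp [pvRevScanAcc, ih]

theorem pvFoldl_eq_rev (l : List (List (String × String))) (acc : String) :
    l.foldl (fun result msg =>
      let content := (PySem.Dict.mk msg).getD "content" ""
      if PySem.Str.startswith content "SYSTEM CONTEXT:" then content else result) acc
    = pvRevScanAcc acc l.reverse := by
  induction l generalizing acc with
  | nil => rfl
  | cons m t ih =>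
    simp only [List.foldl_cons, List.reverse_cons]
    rw [ih, pvRevScanAcc_append]

-- ===== VERDICT =====
theorem extract_problem_context_spec : Claim_equal_extract_problem_context := by
  intro messages _
  unfold Spec_extract_problem_context extract_problem_context extract_problem_context_alt
  rw [pvFoldl_eq_rev, ← pvRevScan_eq_acc]
  cases messages with
  | nil => rfl
  | cons m t => simp
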